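-- pv_equiv track=rewrite | github.com/simonsshoot/imple | evaluator.py | normalize_object_name
-- ===== SOURCE A (Python) =====
-- def normalize_object_name(name: str) -> str:
--     """Normalize object name for comparison."""
--     s = str(name).strip().casefold()
--     s = "".join(
--         ch if ("a" <= ch <= "z") or ("0" <= ch <= "9") or ch in {"_", "-"} else "_"
--         for ch in s
--     )
--     while "__" in s:
--         s = s.replace("__", "_")
--     return s.strip("_")
-- ===== SOURCE B (Python) =====
-- def normalize_object_name(name: str) -> str:
--     """Normalize object name for comparison."""
--     s = str(name).strip().casefold()
--     tokens = []
--     cur = []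
--     for ch in s:
--         if ("a" <= ch <= "z") or ("0" <= ch <= "9") or ch == "-":
--             cur.append(ch)
--         elif cur:
--             tokens.append("".join(cur))
--             cur = []
--     if cur:
--         tokens.append("".join(cur))
--     return "_".join(tokens)
-- ===== Notes on version B (the rewrite author's own statement) =====
-- stated objective: simpler
-- what changed: B collects the maximal runs of allowed characters (lowercase letters, digits, hyphen) in one pass and joins them with single underscores, instead of A's rewrite-every-char pass followed by a while-loop collapsing doubled underscores and a final strip of underscores.
import Mathlib
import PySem

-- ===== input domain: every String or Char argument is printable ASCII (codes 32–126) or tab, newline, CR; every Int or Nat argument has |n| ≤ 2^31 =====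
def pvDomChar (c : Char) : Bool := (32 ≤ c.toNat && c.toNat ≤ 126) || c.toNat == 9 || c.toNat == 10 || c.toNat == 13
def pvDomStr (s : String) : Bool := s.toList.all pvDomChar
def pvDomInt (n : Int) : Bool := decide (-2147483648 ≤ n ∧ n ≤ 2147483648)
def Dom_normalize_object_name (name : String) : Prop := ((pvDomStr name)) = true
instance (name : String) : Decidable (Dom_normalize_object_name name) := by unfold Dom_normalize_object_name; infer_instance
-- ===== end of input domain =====

-- B replaces A's per-char rewrite, the while-loop collapsing doubled underscores and the final
-- strip of underscores by one pass collecting the maximal allowed-character runs, joined with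
-- single underscores (objective: simpler).

-- ===== PORT A =====
-- Python's `"a" <= ch <= "z" or "0" <= ch <= "9" or ch in {"_", "-"}` (the set membership as the two equalities)
def pvKeepA (ch : Char) : Bool :=
  decide (('a' ≤ ch ∧ ch ≤ 'z') ∨ ('0' ≤ ch ∧ ch ≤ '9') ∨ ch = '_' ∨ ch = '-')

-- The next declarations up to pvReplaceLen exist only to justify the while-loop's termination
-- (s.replace("__","_") shortens s while "__" occurs); collapseA cites pvReplaceLen by name.
def pvRepl : List Char → List Char
  | [] => []
  | [c] => [c]
  | a :: b :: r => if a = '_' ∧ b = '_' then '_' :: pvRepl r else a :: pvRepl (b :: r)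

theorem pvRepl_length_le (l : List Char) : (pvRepl l).length ≤ l.length := by
  fun_induction pvRepl l with
  | case1 => simp
  | case2 c => simp
  | case3 a b r h ih => simp only [List.length_cons]; omega
  | case4 a b r h ih => simp only [List.length_cons]; simpa using ih

theorem pvGoEq : ∀ (fuel : Nat) (l acc : List Char), l.length ≤ fuel →
    PySem.Chars.replace.go ['_','_'] ['_'] fuel l acc = acc.reverse ++ pvRepl l := by
  intro fuel
  induction fuel with
  | zero =>
    intro l acc h
    have h0 : l = [] := List.eq_nil_of_length_eq_zero (Nat.le_zero.mp h)
    subst h0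
    simp [PySem.Chars.replace.go, pvRepl]
  | succ n ih =>
    intro l acc h
    match l with
    | [] => simp [PySem.Chars.replace.go, pvRepl]
    | c :: t =>
      rw [PySem.Chars.replace.go]
      match t with
      | [] =>
        have hp : (['_','_'] : List Char).isPrefixOf [c] = false := by
          simp [List.isPrefixOf]
        rw [hp]
        simp only [Bool.false_eq_true, if_false]
        rw [ih [] (c :: acc) (by simp)]
        simp [pvRepl]
      | d :: r =>
        by_cases hcd : c = '_' ∧ d = '_'
        · obtain ⟨hc, hd⟩ := hcd
          subst hc; subst hd
          have hp : (['_','_'] : List Char).isPrefixOf ('_' :: '_' :: r) = true := by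
            simp [List.isPrefixOf]
          rw [hp]
          simp only [if_true]
          rw [ih]
          · simp [pvRepl]
          · simp at h ⊢; omega
        · have hp : (['_','_'] : List Char).isPrefixOf (c :: d :: r) = false := by
            simp [List.isPrefixOf]
            intro hc hd
            exact hcd ⟨hc.symm, hd.symm⟩
          rw [hp]
          simp only [Bool.false_eq_true, if_false]
          rw [ih (d :: r) (c :: acc) (by simp at h ⊢; omega)]
          simp [pvRepl, hcd]

theorem pvReplace_eq_pvRepl (l : List Char) :
    PySem.Chars.replace l ['_','_'] ['_'] = pvRepl l := by
  rw [PySem.Chars.replace]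
  simp only [List.isEmpty_cons, Bool.false_eq_true, if_false]
  simpa using pvGoEq l.length l [] (le_refl _)

theorem pvDD_len {l : List Char} (h : ['_','_'] <:+: l) : 2 ≤ l.length := by
  simpa using h.length_le

theorem pvReplLen' : ∀ l : List Char, ['_','_'] <:+: l → (pvRepl l).length < l.length := by
  intro l
  fun_induction pvRepl l with
  | case1 => intro h; exact absurd (pvDD_len h) (by simp)
  | case2 c => intro h; exact absurd (pvDD_len h) (by simp)
  | case3 a b r h ih =>
    intro _
    have := pvRepl_length_le r
    simp only [List.length_cons]
    omega
  | case4 a b r h ih =>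
    intro hdd
    have hdd' : ['_','_'] <:+: (b :: r) := by
      rcases (List.infix_cons_iff).mp hdd with hpre | htl
      · rcases (List.cons_prefix_cons).mp hpre with ⟨ha, hpre2⟩
        rcases (List.cons_prefix_cons).mp hpre2 with ⟨hb, _⟩
        exact absurd ⟨ha.symm, hb.symm⟩ h
      · exact htl
    have := ih hdd'
    simp only [List.length_cons] at this ⊢
    omega

theorem pvReplaceLen (l : List Char) (h : PySem.Chars.isIn ['_','_'] l = true) :
    (PySem.Chars.replace l ['_','_'] ['_']).length < l.length := by
  rw [pvReplace_eq_pvRepl]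
  exact pvReplLen' l ((PySem.Chars.isIn_iff_infix ['_','_'] l).mp h)

-- `while "__" in s: s = s.replace("__", "_")`
def collapseA (l : List Char) : List Char :=
  if h : PySem.Chars.isIn ['_','_'] l = true then
    collapseA (PySem.Chars.replace l ['_','_'] ['_'])
  else l
termination_by l.length
decreasing_by exact pvReplaceLen l h

def normalize_object_name (name : String) : String :=
  -- str(name).strip().casefold(): casefold = lower on the ASCII domain
  let s := PySem.Chars.lower (PySem.Chars.strip name.toList)
  let s := s.map (fun ch => if pvKeepA ch then ch else '_')
  let s := collapseA s
  String.ofList (PySem.Chars.stripChars s ['_'])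

-- ===== PORT B =====
def pvTokB (ch : Char) : Bool :=
  decide (('a' ≤ ch ∧ ch ≤ 'z') ∨ ('0' ≤ ch ∧ ch ≤ '9') ∨ ch = '-')

-- the for-loop: state = (tokens, cur)
def pvStepB (st : List (List Char) × List Char) (ch : Char) : List (List Char) × List Char :=
  if pvTokB ch then (st.1, st.2 ++ [ch])
  else if st.2 ≠ [] then (st.1 ++ [st.2], []) else st

def normalize_object_name_alt (name : String) : String :=
  let s := PySem.Chars.lower (PySem.Chars.strip name.toList)
  let st := s.foldl pvStepB ([], [])
  let tokens := if st.2 ≠ [] then st.1 ++ [st.2] else st.1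
  String.ofList (PySem.Chars.join ['_'] tokens)

-- ===== PRECONDITION & SPEC =====
def Spec_normalize_object_name (name : String) (out : String) : Prop := out = normalize_object_name_alt name
instance (name : String) (out : String) : Decidable (Spec_normalize_object_name name out) := by unfold Spec_normalize_object_name; infer_instance

-- ===== CLAIM (what is proved, stated in full; the proofs are below) =====
def Claim_equal_normalize_object_name : Prop := ∀ (name : String), Dom_normalize_object_name name → Spec_normalize_object_name name (normalize_object_name name)

-- ===== LEMMAS AND PROOFS =====

-- collapsing adjacent underscores, as a simple recursion
def pvSq : List Char → List Char
  | [] => []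
  | [c] => [c]
  | a :: b :: r => if a = '_' ∧ b = '_' then pvSq (b :: r) else a :: pvSq (b :: r)

theorem pvRepl_cons_head (c : Char) (t : List Char) : ∃ t', pvRepl (c :: t) = c :: t' := by
  cases t with
  | nil => exact ⟨[], rfl⟩
  | cons b r =>
    by_cases h : c = '_' ∧ b = '_'
    · exact ⟨pvRepl r, by simp [pvRepl, h]⟩
    · exact ⟨pvRepl (b :: r), by simp [pvRepl, h]⟩

theorem pvSq_repl : ∀ (n : Nat) (l : List Char), l.length ≤ n →
    pvSq (pvRepl l) = pvSq l ∧ pvSq ('_' :: pvRepl l) = pvSq ('_' :: l) := by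
  intro n
  induction n with
  | zero =>
    intro l h
    have h0 : l = [] := List.eq_nil_of_length_eq_zero (Nat.le_zero.mp h)
    subst h0; exact ⟨rfl, rfl⟩
  | succ n ih =>
    intro l h
    match l with
    | [] => exact ⟨rfl, rfl⟩
    | [c] => exact ⟨rfl, rfl⟩
    | a :: b :: r =>
      by_cases hab : a = '_' ∧ b = '_'
      · obtain ⟨ha, hb⟩ := hab; subst ha; subst hb
        simp only [List.length_cons] at h
        have hr : r.length ≤ n := by omega
        have i1 := (ih r hr).2
        constructor
        · show pvSq (pvRepl ('_'::'_'::r)) = pvSq ('_'::'_'::r)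
          rw [show pvRepl ('_'::'_'::r) = '_' :: pvRepl r from by simp [pvRepl]]
          rw [i1]
          simp [pvSq]
        · show pvSq ('_' :: pvRepl ('_'::'_'::r)) = pvSq ('_'::'_'::'_'::r)
          rw [show pvRepl ('_'::'_'::r) = '_' :: pvRepl r from by simp [pvRepl]]
          rw [show pvSq ('_'::'_'::pvRepl r) = pvSq ('_'::pvRepl r) from by simp [pvSq]]
          rw [i1]
          simp [pvSq]
      · have hrepl : pvRepl (a :: b :: r) = a :: pvRepl (b :: r) := by simp [pvRepl, hab]
        obtain ⟨t', ht'⟩ := pvRepl_cons_head b r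
        simp only [List.length_cons] at h
        have htl : (b :: r).length ≤ n := by simp; omega
        have i0 := (ih (b :: r) htl).1
        have main : pvSq (pvRepl (a :: b :: r)) = pvSq (a :: b :: r) := by
          rw [hrepl, ht']
          rw [show pvSq (a :: b :: t') = a :: pvSq (b :: t') from by simp [pvSq, hab]]
          rw [← ht', i0]
          simp [pvSq, hab]
        refine ⟨main, ?_⟩
        by_cases ha : a = '_'
        · subst ha
          rw [show pvSq ('_' :: pvRepl ('_' :: b :: r)) = pvSq (pvRepl ('_' :: b :: r)) from by
                rw [hrepl]; simp [pvSq]]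
          rw [main]
          simp [pvSq]
        · rw [hrepl]
          rw [show pvSq ('_' :: a :: pvRepl (b :: r)) = '_' :: pvSq (a :: pvRepl (b :: r)) from by
                simp [pvSq, ha]]
          rw [← hrepl, main]
          simp [pvSq, ha]

theorem pvSq_of_noDD : ∀ l : List Char, ¬ ['_','_'] <:+: l → pvSq l = l := by
  intro l
  fun_induction pvSq l with
  | case1 => intro; rfl
  | case2 c => intro; rfl
  | case3 a b r h ih =>
    intro hdd
    exfalso
    exact hdd (List.infix_cons_iff.mpr (Or.inl (by simp [h.1, h.2, List.cons_prefix_cons])))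
  | case4 a b r h ih =>
    intro hdd
    have : ¬ ['_','_'] <:+: (b :: r) := fun hc => hdd (List.infix_cons_iff.mpr (Or.inr hc))
    rw [ih this]

theorem pvCollapse_eq_sq : ∀ (n : Nat) (l : List Char), l.length ≤ n → collapseA l = pvSq l := by
  intro n
  induction n with
  | zero =>
    intro l h
    have h0 : l = [] := List.eq_nil_of_length_eq_zero (Nat.le_zero.mp h)
    subst h0; rw [collapseA]; rfl
  | succ n ih =>
    intro l h
    rw [collapseA]
    by_cases hin : PySem.Chars.isIn ['_','_'] l = true
    · rw [dif_pos hin, pvReplace_eq_pvRepl]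
      have hdd := (PySem.Chars.isIn_iff_infix ['_','_'] l).mp hin
      have hlt := pvReplLen' l hdd
      rw [ih (pvRepl l) (by omega)]
      exact (pvSq_repl l.length l (le_refl _)).1
    · rw [dif_neg hin]
      exact (pvSq_of_noDD l (fun hc => hin ((PySem.Chars.isIn_iff_infix ['_','_'] l).mpr hc))).symm

def pvRstrip (y : List Char) : List Char :=
  (y.reverse.dropWhile (fun c => (['_'] : List Char).contains c)).reverse

theorem pvStrip_und_cons (y : List Char) :
    PySem.Chars.stripChars ('_' :: y) ['_'] = PySem.Chars.stripChars y ['_'] := by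
  simp [PySem.Chars.stripChars, List.dropWhile]

theorem pvRstrip_cons_of_ne {c : Char} (h : c ≠ '_') (y : List Char) :
    pvRstrip (c :: y) = c :: pvRstrip y := by
  unfold pvRstrip
  rw [show (c :: y).reverse = y.reverse ++ [c] from by simp]
  rw [List.dropWhile_append]
  by_cases he : (y.reverse.dropWhile (fun c => (['_'] : List Char).contains c)).isEmpty
  · rw [if_pos he]
    rw [List.isEmpty_iff] at he
    rw [he]
    simp [List.dropWhile, h]
  · rw [if_neg he]
    simp

theorem pvStripChars_eq_rstrip_dropWhile (s : List Char) :
    PySem.Chars.stripChars s ['_'] = pvRstrip (s.dropWhile (fun c => (['_'] : List Char).contains c)) := rfl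

theorem pvStrip_cons_of_ne {c : Char} (h : c ≠ '_') (y : List Char) :
    PySem.Chars.stripChars (c :: y) ['_'] = c :: pvRstrip y := by
  rw [pvStripChars_eq_rstrip_dropWhile]
  rw [show List.dropWhile (fun x => (['_'] : List Char).contains x) (c :: y) = c :: y from by
        simp [List.dropWhile, h]]
  exact pvRstrip_cons_of_ne h y

theorem pvRstrip_und_cons (z : List Char) :
    pvRstrip ('_' :: z) = if pvRstrip z = [] then [] else '_' :: pvRstrip z := by
  unfold pvRstrip
  rw [show ('_' :: z).reverse = z.reverse ++ ['_'] from by simp]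
  rw [List.dropWhile_append]
  by_cases he : (z.reverse.dropWhile (fun c => (['_'] : List Char).contains c)).isEmpty
  · rw [if_pos he]
    rw [List.isEmpty_iff] at he
    rw [he]
    simp [List.dropWhile]
  · rw [List.isEmpty_iff] at he
    rw [if_neg (by simpa [List.isEmpty_iff] using he)]
    rw [if_neg (fun hc => he (List.reverse_eq_nil_iff.mp hc))]
    simp

def pvMapA (ch : Char) : Char := if pvKeepA ch then ch else '_'

def pvPl (x : List Char) : Prop := ∀ c ∈ x, pvTokB c = true ∨ c = '_'

theorem pvTok_ne_und {c : Char} (h : pvTokB c = true) : c ≠ '_' := by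
  intro hc; subst hc; exact absurd h (by decide)

theorem pvMapA_of_tok {ch : Char} (h : pvTokB ch = true) : pvMapA ch = ch := by
  unfold pvMapA pvKeepA
  unfold pvTokB at h
  rw [if_pos]
  rw [decide_eq_true_iff] at *
  tauto

theorem pvTok_mapA (ch : Char) : pvTokB (pvMapA ch) = pvTokB ch := by
  by_cases h : pvTokB ch = true
  · rw [pvMapA_of_tok h]
  · rw [Bool.not_eq_true] at h
    rw [h]
    unfold pvMapA pvKeepA
    unfold pvTokB at h ⊢
    rw [decide_eq_false_iff_not] at h
    by_cases hk : ('a' ≤ ch ∧ ch ≤ 'z') ∨ ('0' ≤ ch ∧ ch ≤ '9') ∨ ch = '_' ∨ ch = '-'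
    · have : ch = '_' := by tauto
      subst this
      simp
    · rw [if_neg (by simpa using hk)]
      decide

theorem pvPl_mapA (l : List Char) : pvPl (l.map pvMapA) := by
  intro c hc
  rw [List.mem_map] at hc
  obtain ⟨a, _, rfl⟩ := hc
  by_cases h : pvTokB a = true
  · left; rw [pvTok_mapA]; exact h
  · unfold pvMapA
    by_cases hk : pvKeepA a = true
    · have ha : a = '_' := by
        unfold pvKeepA at hk
        unfold pvTokB at h
        rw [decide_eq_true_iff] at hk
        simp only [decide_eq_true_iff] at h
        tauto
      right; rw [if_pos hk]; exact ha
    · right; rw [Bool.not_eq_true] at hk; rw [hk]; simp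

-- the maximal allowed-runs of the input, given the currently open run `cur`
def pvTks : List Char → List Char → List (List Char)
  | cur, [] => if cur = [] then [] else [cur]
  | cur, c :: r => if pvTokB c then pvTks (cur ++ [c]) r else if cur ≠ [] then cur :: pvTks [] r else pvTks [] r

-- the output remaining while inside an open run
def pvJoinCont : List Char → List Char
  | [] => []
  | c :: r => if pvTokB c then c :: pvJoinCont r
      else if pvTks [] r = [] then [] else '_' :: PySem.Chars.join ['_'] (pvTks [] r)

theorem pvTks_ne_nil : ∀ (x : List Char) (cur : List Char), [] ∉ pvTks cur x := by
  intro x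
  induction x with
  | nil =>
    intro cur
    unfold pvTks
    by_cases h : cur = []
    · simp [h]
    · simp [h]
  | cons c r ih =>
    intro cur
    unfold pvTks
    by_cases ht : pvTokB c = true
    · simp only [ht, if_true]; exact ih _
    · simp only [ht]
      by_cases hc : cur = []
      · simp [hc]; exact ih []
      · simp only [Bool.false_eq_true, if_false, if_pos (by simpa using hc)]
        intro hmem
        rcases List.mem_cons.mp hmem with h1 | h2
        · exact hc h1.symm
        · exact ih [] h2

theorem pvJoin_ne_nil {ts : List (List Char)} (h0 : ts ≠ []) (h1 : [] ∉ ts) :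
    PySem.Chars.join ['_'] ts ≠ [] := by
  match ts with
  | [] => exact absurd rfl h0
  | [t] =>
    rw [PySem.Chars.join_singleton]
    exact fun hc => h1 (by simp [hc])
  | t1 :: t2 :: rest =>
    rw [PySem.Chars.join_cons_cons]
    intro hc
    simp at hc

theorem pvJoin_tks : ∀ (x : List Char) (cur : List Char), cur ≠ [] →
    PySem.Chars.join ['_'] (pvTks cur x) = cur ++ pvJoinCont x := by
  intro x
  induction x with
  | nil =>
    intro cur h
    unfold pvTks
    rw [if_neg h, PySem.Chars.join_singleton]
    simp [pvJoinCont]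
  | cons c r ih =>
    intro cur h
    unfold pvTks pvJoinCont
    by_cases ht : pvTokB c = true
    · simp only [ht, if_true]
      rw [ih (cur ++ [c]) (by simp)]
      simp
    · simp only [ht, Bool.false_eq_true, if_false, if_pos (by simpa using h)]
      by_cases hr : pvTks [] r = []
      · rw [hr, PySem.Chars.join_singleton]
        simp
      · rw [if_neg hr]
        match hm : pvTks [] r with
        | [] => exact absurd hm hr
        | t :: rest =>
          rw [PySem.Chars.join_cons_cons]
          simp

theorem pvJoinCont_eq_join (x : List Char)
    (h : x = [] ∨ ∃ c r, x = c :: r ∧ pvTokB c = true) :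
    pvJoinCont x = PySem.Chars.join ['_'] (pvTks [] x) := by
  rcases h with rfl | ⟨c, r, rfl, htok⟩
  · simp [pvJoinCont, pvTks, PySem.Chars.join_nil]
  · unfold pvJoinCont pvTks
    rw [if_pos htok, if_pos htok]
    rw [show ([] : List Char) ++ [c] = [c] from rfl]
    rw [pvJoin_tks r [c] (by simp)]
    simp

theorem pvTks_dropWhile : ∀ r : List Char,
    pvTks [] (r.dropWhile (· == '_')) = pvTks [] r := by
  intro r
  induction r with
  | nil => rfl
  | cons c r ih =>
    by_cases hc : c = '_'
    · subst hc
      rw [List.dropWhile_cons_of_pos (by simp)]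
      conv_rhs => unfold pvTks
      rw [if_neg (by decide)]
      simpa using ih
    · rw [List.dropWhile_cons_of_neg (by simpa using hc)]

theorem pvTks_map : ∀ (x : List Char) (cur : List Char), pvTks cur (x.map pvMapA) = pvTks cur x := by
  intro x
  induction x with
  | nil => intro cur; rfl
  | cons c r ih =>
    intro cur
    rw [List.map_cons]
    unfold pvTks
    rw [pvTok_mapA]
    by_cases ht : pvTokB c = true
    · rw [if_pos ht, if_pos ht, pvMapA_of_tok ht, ih]
    · rw [if_neg ht, if_neg ht, ih]

theorem pvSq_und_cons : ∀ r : List Char,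
    pvSq ('_' :: r) = '_' :: pvSq (r.dropWhile (· == '_')) := by
  intro r
  induction r with
  | nil => rfl
  | cons c r ih =>
    by_cases hc : c = '_'
    · subst hc
      rw [show pvSq ('_' :: '_' :: r) = pvSq ('_' :: r) from by simp [pvSq]]
      rw [ih]
      rw [List.dropWhile_cons_of_pos (by simp)]
    · rw [show pvSq ('_' :: c :: r) = '_' :: pvSq (c :: r) from by simp [pvSq, hc]]
      rw [List.dropWhile_cons_of_neg (by simpa using hc)]

theorem pvSq_cons_of_ne {a : Char} (h : a ≠ '_') (y : List Char) : pvSq (a :: y) = a :: pvSq y := by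
  cases y with
  | nil => rfl
  | cons b r => simp [pvSq, h]

theorem pvFold : ∀ (x : List Char) (toks : List (List Char)) (cur : List Char),
    (if (x.foldl pvStepB (toks, cur)).2 ≠ [] then
       (x.foldl pvStepB (toks, cur)).1 ++ [(x.foldl pvStepB (toks, cur)).2]
     else (x.foldl pvStepB (toks, cur)).1) = toks ++ pvTks cur x := by
  intro x
  induction x with
  | nil =>
    intro toks cur
    unfold pvTks
    by_cases h : cur = []
    · simp [h]
    · simp [List.foldl, h]
  | cons c r ih =>
    intro toks cur
    rw [List.foldl_cons]
    by_cases ht : pvTokB c = true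
    · rw [show pvStepB (toks, cur) c = (toks, cur ++ [c]) from by simp [pvStepB, ht]]
      rw [ih toks (cur ++ [c])]
      conv_rhs => unfold pvTks
      rw [if_pos ht]
    · by_cases hc : cur = []
      · subst hc
        rw [show pvStepB (toks, []) c = (toks, []) from by simp [pvStepB, ht]]
        rw [ih toks []]
        conv_rhs => unfold pvTks
        rw [if_neg ht]
        simp
      · rw [show pvStepB (toks, cur) c = (toks ++ [cur], []) from by simp [pvStepB, ht, hc]]
        rw [ih (toks ++ [cur]) []]
        conv_rhs => unfold pvTks
        rw [if_neg ht, if_pos (by simpa using hc)]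
        simp

theorem pvPl_tail {c : Char} {r : List Char} (h : pvPl (c :: r)) : pvPl r :=
  fun x hx => h x (List.mem_cons_of_mem _ hx)

theorem pvPl_dropWhile {r : List Char} (h : pvPl r) : pvPl (r.dropWhile (· == '_')) :=
  fun x hx => h x ((List.dropWhile_sublist _).mem hx)

theorem pvDropWhile_head_tok {r : List Char} (h : pvPl r) :
    r.dropWhile (· == '_') = [] ∨
      ∃ c t, r.dropWhile (· == '_') = c :: t ∧ pvTokB c = true := by
  match hm : r.dropWhile (· == '_') with
  | [] => exact Or.inl rfl
  | c :: t =>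
    right
    refine ⟨c, t, rfl, ?_⟩
    have hne : c ≠ '_' := by
      have h2 := List.head_dropWhile_not (fun x => x == '_') (l := r) (by rw [hm]; simp)
      simp only [hm, List.head_cons] at h2
      simpa using h2
    have hmem : c ∈ r := (List.dropWhile_sublist _).mem (by rw [hm]; exact List.mem_cons_self)
    rcases h c hmem with h1 | h1
    · exact h1
    · exact absurd h1 hne

theorem pvG2 : ∀ (n : Nat) (r : List Char), r.length ≤ n → pvPl r →
    pvRstrip (pvSq r) = pvJoinCont r := by
  intro n
  induction n with
  | zero =>
    intro r h _
    have h0 : r = [] := List.eq_nil_of_length_eq_zero (Nat.le_zero.mp h)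
    subst h0; rfl
  | succ n ih =>
    intro r h hp
    match r with
    | [] => rfl
    | c :: r' =>
      by_cases ht : pvTokB c = true
      · have hc := pvTok_ne_und ht
        rw [pvSq_cons_of_ne hc, pvRstrip_cons_of_ne hc]
        rw [ih r' (by simp only [List.length_cons] at h; omega) (pvPl_tail hp)]
        rw [show pvJoinCont (c :: r') = c :: pvJoinCont r' from by
              simp only [pvJoinCont, if_pos ht]]
      · have hc : c = '_' := by
          rcases hp c (List.mem_cons_self) with h1 | h1
          · exact absurd h1 ht
          · exact h1
        subst hc
        rw [pvSq_und_cons]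
        rw [pvRstrip_und_cons]
        set w := r'.dropWhile (· == '_') with hw
        have hwlen : w.length ≤ n := by
          have hwl : w.length ≤ r'.length := by rw [hw]; exact List.length_dropWhile_le _ _
          simp only [List.length_cons] at h
          omega
        have hwpl : pvPl w := pvPl_dropWhile (pvPl_tail hp)
        rw [ih w hwlen hwpl]
        have hjoin : pvJoinCont w = PySem.Chars.join ['_'] (pvTks [] w) := by
          apply pvJoinCont_eq_join
          exact pvDropWhile_head_tok (pvPl_tail hp)
        have htks : pvTks [] w = pvTks [] r' := pvTks_dropWhile r'
        rw [hjoin, htks]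
        unfold pvJoinCont
        by_cases hnil : pvTks [] r' = []
        · rw [if_pos (by rw [hnil, PySem.Chars.join_nil]), if_neg (by decide), if_pos hnil]
        · rw [if_neg (pvJoin_ne_nil hnil (pvTks_ne_nil r' [])), if_neg (by decide), if_neg hnil]

theorem pvG1 : ∀ (n : Nat) (x : List Char), x.length ≤ n → pvPl x →
    PySem.Chars.stripChars (pvSq x) ['_'] = PySem.Chars.join ['_'] (pvTks [] x) := by
  intro n
  induction n with
  | zero =>
    intro x h _
    have h0 : x = [] := List.eq_nil_of_length_eq_zero (Nat.le_zero.mp h)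
    subst h0
    rw [show pvTks ([] : List Char) ([] : List Char) = [] from rfl, PySem.Chars.join_nil]
    rfl
  | succ n ih =>
    intro x h hp
    match x with
    | [] => rw [show pvTks ([] : List Char) ([] : List Char) = [] from rfl, PySem.Chars.join_nil]; rfl
    | c :: r =>
      by_cases ht : pvTokB c = true
      · have hc := pvTok_ne_und ht
        rw [pvSq_cons_of_ne hc, pvStrip_cons_of_ne hc]
        rw [pvG2 r.length r (le_refl _) (pvPl_tail hp)]
        have : pvJoinCont (c :: r) = PySem.Chars.join ['_'] (pvTks [] (c :: r)) := by
          apply pvJoinCont_eq_join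
          exact Or.inr ⟨c, r, rfl, ht⟩
        rw [← this]
        rw [show pvJoinCont (c :: r) = c :: pvJoinCont r from by
              simp only [pvJoinCont, if_pos ht]]
      · have hc : c = '_' := by
          rcases hp c (List.mem_cons_self) with h1 | h1
          · exact absurd h1 ht
          · exact h1
        subst hc
        rw [pvSq_und_cons, pvStrip_und_cons]
        set w := r.dropWhile (· == '_') with hw
        have hwlen : w.length ≤ n := by
          have hwl : w.length ≤ r.length := by rw [hw]; exact List.length_dropWhile_le _ _
          simp only [List.length_cons] at h
          omega
        rw [ih w hwlen (pvPl_dropWhile (pvPl_tail hp))]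
        rw [pvTks_dropWhile r]
        conv_rhs => unfold pvTks
        rw [if_neg (by decide)]
        simp

-- ===== VERDICT (by name: the statement is the Claim_ definition above) =====
theorem normalize_object_name_spec : Claim_equal_normalize_object_name := by
  intro name _
  unfold Spec_normalize_object_name normalize_object_name normalize_object_name_alt
  set s := PySem.Chars.lower (PySem.Chars.strip name.toList) with hs
  apply congrArg String.ofList
  have hmap : (fun ch => if pvKeepA ch then ch else '_') = pvMapA := by
    funext ch; rfl
  rw [hmap]
  rw [pvCollapse_eq_sq (s.map pvMapA).length _ (le_refl _)]
  rw [pvG1 (s.map pvMapA).length _ (le_refl _) (pvPl_mapA s)]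
  rw [pvTks_map s []]
  rw [pvFold s [] []]
  simp
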